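-- pv_equiv track=rewrite | github.com/nyimbi/flowforge | python/flowforge-cli/src/flowforge_cli/commands/simulate.py | _flatten_events
-- ===== SOURCE A (Python) =====
-- def _flatten_events(raw: list[str]) -> list[str]:
-- 	out: list[str] = []
-- 	for entry in raw:
-- 		for piece in entry.split(","):
-- 			piece = piece.strip()
-- 			if piece:
-- 				out.append(piece)
-- 	return out
-- ===== SOURCE B (Python) =====
-- def _flatten_events(raw: list[str]) -> list[str]:
-- 	# Single character-level scan per entry: no split()/strip() calls.
-- 	# cur holds the token stripped-so-far; pend buffers interior whitespace
-- 	# that only becomes part of the token if a non-space char follows.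
-- 	out: list[str] = []
-- 	for entry in raw:
-- 		cur = ""
-- 		pend = ""
-- 		for c in entry:
-- 			if c == ",":
-- 				if cur:
-- 					out.append(cur)
-- 				cur = ""
-- 				pend = ""
-- 			elif c.isspace():
-- 				if cur:
-- 					pend += c
-- 			else:
-- 				cur += pend + c
-- 				pend = ""
-- 		if cur:
-- 			out.append(cur)
-- 	return out
-- ===== Notes on version B (the rewrite author's own statement) =====
-- stated objective: alternative
-- what changed: Replaces per-entry split(',')/strip()/append with a single character-level state-machine scan per entry (current-token buffer plus pending-whitespace buffer) that emits tokens directly, never calling split or strip.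
import Mathlib
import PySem

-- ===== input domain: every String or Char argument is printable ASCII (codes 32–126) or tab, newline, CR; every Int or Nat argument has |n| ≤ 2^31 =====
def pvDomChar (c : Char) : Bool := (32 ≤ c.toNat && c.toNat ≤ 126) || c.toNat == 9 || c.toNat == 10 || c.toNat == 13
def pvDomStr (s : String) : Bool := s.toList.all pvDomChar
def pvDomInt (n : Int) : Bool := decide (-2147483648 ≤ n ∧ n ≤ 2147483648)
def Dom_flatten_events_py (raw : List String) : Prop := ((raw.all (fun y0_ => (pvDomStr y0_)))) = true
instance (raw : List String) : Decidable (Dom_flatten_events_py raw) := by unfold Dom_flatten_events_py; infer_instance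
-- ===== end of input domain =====

-- B replaces A's split(",")/strip()/filter per entry by a single character-level state-machine scan (token buffer + pending-whitespace buffer) that emits tokens directly (alternative; same cost).


-- ===== PORT A =====
-- entry.split(",") has a nonempty literal separator, so it never raises: ported as
-- PySem.Chars.splitOn on the code points (exact per PYSEM), pieces turned back into Strings.
def flatten_events_py (raw : List String) : List String :=
  raw.foldl
    (fun out entry =>
      ((PySem.Chars.splitOn entry.toList ",".toList).map String.ofList).foldl
        (fun out piece =>
          let piece := PySem.Str.strip piece
          if piece != "" then out ++ [piece] else out)
        out)
    []

-- ===== PORT B =====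
-- Source B's inner loop body: state = (out, cur, pend) over the characters of one entry.
-- c.isspace() is PySem.Chars.isspace (exact on the stated ASCII domain).
def bStep (st : List String × List Char × List Char) (c : Char) :
    List String × List Char × List Char :=
  let (out, cur, pend) := st
  if c = ',' then
    ((if cur ≠ [] then out ++ [String.ofList cur] else out), [], [])
  else if PySem.Chars.isspace c then
    (out, cur, if cur ≠ [] then pend ++ [c] else pend)
  else
    (out, cur ++ pend ++ [c], [])

-- Source B's trailing "if cur: out.append(cur)" after the character loop.
def bFlush (st : List String × List Char × List Char) : List String :=
  if st.2.1 ≠ [] then st.1 ++ [String.ofList st.2.1] else st.1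

def flatten_events_py_alt (raw : List String) : List String :=
  raw.foldl (fun out entry => bFlush (entry.toList.foldl bStep (out, [], []))) []

-- ===== PRECONDITION & SPEC =====
def Spec_flatten_events_py (raw : List String) (out : List String) : Prop := out = flatten_events_py_alt raw
instance (raw : List String) (out : List String) : Decidable (Spec_flatten_events_py raw out) := by unfold Spec_flatten_events_py; infer_instance

-- ===== CLAIM (what is proved, stated in full; the proofs are below) =====
def Claim_equal_flatten_events_py : Prop := ∀ (raw : List String), Dom_flatten_events_py raw → Spec_flatten_events_py raw (flatten_events_py raw)

-- ===== LEMMAS AND PROOFS =====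

-- Simple structural model of splitting a character list on ','.
def spC : List Char → List (List Char)
  | [] => [[]]
  | c :: cs =>
    if c = ',' then [] :: spC cs
    else
      match spC cs with
      | [] => [[c]]
      | p :: ps => (c :: p) :: ps

lemma spC_ne_nil (cs : List Char) : spC cs ≠ [] := by
  cases cs with
  | nil => simp [spC]
  | cons c cs =>
    simp only [spC]
    split
    · simp
    · split <;> simp

-- prepend a prefix onto the first piece
def consHead (pre : List Char) : List (List Char) → List (List Char)
  | [] => [pre]
  | p :: ps => (pre ++ p) :: ps

lemma consHead_nil (xs : List (List Char)) (h : xs ≠ []) : consHead [] xs = xs := by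
  cases xs with
  | nil => exact absurd rfl h
  | cons p ps => simp [consHead]

lemma go_eq (fuel : Nat) : ∀ (l cur : List Char) (acc : List (List Char)), l.length ≤ fuel →
    PySem.Chars.splitOn.go [','] fuel l cur acc = acc.reverse ++ consHead cur.reverse (spC l) := by
  induction fuel with
  | zero =>
    intro l cur acc h
    have hl : l = [] := by cases l <;> simp_all
    subst hl
    simp [PySem.Chars.splitOn.go, spC, consHead]
  | succ n ih =>
    intro l cur acc h
    cases l with
    | nil => simp [PySem.Chars.splitOn.go, spC, consHead]
    | cons c rest =>
      by_cases hc : c = ','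
      · subst hc
        rw [PySem.Chars.splitOn.go]
        simp only [List.isPrefixOf, BEq.rfl, Bool.true_and, if_true]
        have hd : List.drop [','].length (',' :: rest) = rest := rfl
        rw [hd]
        rw [ih rest [] (cur.reverse :: acc) (by simpa using Nat.lt_succ_iff.mp (by simpa using h))]
        obtain ⟨p, ps, hps⟩ : ∃ p ps, spC rest = p :: ps := by
          cases hx : spC rest with
          | nil => exact absurd hx (spC_ne_nil rest)
          | cons p ps => exact ⟨p, ps, rfl⟩
        simp [spC, hps, consHead]
      · rw [PySem.Chars.splitOn.go]
        have hbeq : ((',' : Char) == c) = false := by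
          simpa using fun h' => hc h'.symm
        simp only [List.isPrefixOf, hbeq, Bool.false_and, if_false, Bool.false_eq_true]
        rw [ih rest (c :: cur) acc (by simpa using Nat.lt_succ_iff.mp (by simpa using h))]
        obtain ⟨p, ps, hps⟩ : ∃ p ps, spC rest = p :: ps := by
          cases hx : spC rest with
          | nil => exact absurd hx (spC_ne_nil rest)
          | cons p ps => exact ⟨p, ps, rfl⟩
        simp [spC, hps, hc, consHead]

lemma splitOn_comma (cs : List Char) : PySem.Chars.splitOn cs [','] = spC cs := by
  unfold PySem.Chars.splitOn
  rw [go_eq (cs.length + 1) cs [] [] (by omega)]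
  simp [consHead_nil _ (spC_ne_nil cs)]

-- the value appended for one raw piece
def fPV (l : List Char) : String := PySem.Str.strip (String.ofList l)

-- A's inner loop over the pieces of one entry appends the stripped nonempty pieces.
lemma inner_eq (entry : String) (out : List String) :
    ((PySem.Chars.splitOn entry.toList ",".toList).map String.ofList).foldl
      (fun out piece =>
        let piece := PySem.Str.strip piece
        if piece != "" then out ++ [piece] else out)
      out
    = out ++ ((spC entry.toList).map fPV).filter (fun s => s != "") := by
  have h1 : ",".toList = [','] := by decide
  rw [h1, splitOn_comma, List.foldl_map]
  rw [List.filter_map]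
  exact PySem.List.foldl_append_if (fun l => fPV l != "") fPV (spC entry.toList) out

-- ===== B-side lemmas =====

-- the scanner's state invariant: pend is all whitespace, cur is empty or stripped at both ends
def ScanInv (cur pend : List Char) : Prop :=
  (∀ x ∈ pend, PySem.Chars.isspace x = true) ∧ (cur = [] → pend = []) ∧
  (∀ x, cur.head? = some x → PySem.Chars.isspace x = false) ∧
  (∀ x, cur.getLast? = some x → PySem.Chars.isspace x = false)

lemma lstrip_cons_of_not_ws (a : Char) (l : List Char) (h : PySem.Chars.isspace a = false) :
    PySem.Chars.lstrip (a :: l) = a :: l := by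
  simp [PySem.Chars.lstrip, h]

lemma strip_cons_ws (c : Char) (p : List Char) (hc : PySem.Chars.isspace c = true) :
    PySem.Chars.strip (c :: p) = PySem.Chars.strip p := by
  simp [PySem.Chars.strip, PySem.Chars.lstrip, hc]

lemma strip_inv (cur pend : List Char) (h : ScanInv cur pend) :
    PySem.Chars.strip (cur ++ pend) = cur := by
  obtain ⟨hws, hnil, hhead, hlast⟩ := h
  cases hcur : cur with
  | nil =>
    have : pend = [] := hnil hcur
    subst this
    simp [PySem.Chars.strip, PySem.Chars.lstrip, PySem.Chars.rstrip]
  | cons a cur' =>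
    subst hcur
    obtain ⟨ys, y, hy⟩ := List.eq_nil_or_concat (a :: cur') |>.resolve_left (by simp)
    have hy2 : a :: cur' = ys ++ [y] := by simpa [List.concat_eq_append] using hy
    have ha : PySem.Chars.isspace a = false := hhead a (by simp)
    have hyne : PySem.Chars.isspace y = false := by
      refine hlast y ?_
      rw [hy2]; exact List.getLast?_concat
    unfold PySem.Chars.strip
    rw [List.cons_append, lstrip_cons_of_not_ws a (cur' ++ pend) ha, ← List.cons_append, hy2]
    unfold PySem.Chars.rstrip
    rw [List.reverse_append]
    have hpend : List.dropWhile PySem.Chars.isspace pend.reverse = [] := by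
      rw [List.dropWhile_eq_nil_iff]
      intro x hx; exact hws x (by simpa using hx)
    rw [List.dropWhile_append, hpend]
    simp only [List.isEmpty_nil, if_true]
    rw [show (ys ++ [y]).reverse = y :: ys.reverse from by simp, List.dropWhile_cons]
    simp [hyne]

lemma ofList_ne_empty_iff (l : List Char) : (String.ofList l != "") = !l.isEmpty := by
  cases l with
  | nil => decide
  | cons a l =>
    have hne : String.ofList (a :: l) ≠ "" := by
      intro h
      have := congrArg String.toList h
      simp at this
    simp [bne_iff_ne, hne]

lemma fPV_inv (cur pend : List Char) (h : ScanInv cur pend) :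
    fPV (cur ++ pend) = String.ofList cur := by
  apply String.ext
  have hl : (fPV (cur ++ pend)).toList = (String.ofList cur).toList := by
    simp [fPV, PySem.Str.toList_strip, strip_inv cur pend h]
  simpa [String.toList] using hl

lemma ScanInv_step (cur pend : List Char) (c : Char) (h : ScanInv cur pend)
    (hw : PySem.Chars.isspace c = false) : ScanInv (cur ++ pend ++ [c]) [] := by
  obtain ⟨hws, hnil, hhead, _⟩ := h
  refine ⟨by simp, by simp, ?_, ?_⟩
  · intro x hx
    cases hcur : cur with
    | nil =>
      have hp : pend = [] := hnil hcur
      subst hcur hp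
      simp only [List.nil_append, List.head?_cons, Option.some.injEq] at hx
      subst hx; exact hw
    | cons a l =>
      subst hcur
      simp only [List.cons_append, List.head?_cons, Option.some.injEq] at hx
      subst hx
      exact hhead a (by simp)
  · intro x hx
    rw [List.getLast?_concat] at hx
    exact (Option.some.inj hx) ▸ hw

lemma ScanInv_ws (cur pend : List Char) (c : Char) (h : ScanInv cur pend)
    (hw : PySem.Chars.isspace c = true) :
    ScanInv cur (if cur ≠ [] then pend ++ [c] else pend) := by
  obtain ⟨hws, hnil, hhead, hlast⟩ := h
  by_cases hc : cur = []
  · subst hc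
    rw [if_neg (fun h => h rfl)]
    exact ⟨hws, hnil, hhead, hlast⟩
  · simp only [ne_eq, hc, not_false_eq_true, if_true]
    refine ⟨?_, fun h' => absurd h' hc, hhead, hlast⟩
    intro x hx
    rcases List.mem_append.mp hx with h1 | h2
    · exact hws x h1
    · simpa [List.mem_singleton.mp h2] using hw

-- ScanInv holds for the initial and the post-comma state
lemma ScanInv_nil : ScanInv [] [] := by
  refine ⟨by simp, fun _ => rfl, by simp, by simp⟩

-- characterisation of one whole entry scan, generalised over the state
lemma scan_eq (cs : List Char) : ∀ (out : List String) (cur pend : List Char), ScanInv cur pend →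
    bFlush (cs.foldl bStep (out, cur, pend)) =
      out ++ ((consHead (cur ++ pend) (spC cs)).map fPV).filter (fun s => s != "") := by
  induction cs with
  | nil =>
    intro out cur pend hinv
    simp only [List.foldl_nil, bFlush, spC, consHead, List.append_nil, List.map_cons,
      List.map_nil, List.filter_cons, List.filter_nil]
    rw [fPV_inv cur pend hinv, ofList_ne_empty_iff]
    cases cur <;> simp
  | cons c cs ih =>
    intro out cur pend hinv
    obtain ⟨p, ps, hps⟩ : ∃ p ps, spC cs = p :: ps := by
      cases hx : spC cs with
      | nil => exact absurd hx (spC_ne_nil cs)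
      | cons p ps => exact ⟨p, ps, rfl⟩
    simp only [List.foldl_cons]
    by_cases hc : c = ','
    · subst hc
      have hstep : bStep (out, cur, pend) ',' =
          ((if cur ≠ [] then out ++ [String.ofList cur] else out), [], []) := by
        simp [bStep]
      rw [hstep, ih _ [] [] ScanInv_nil]
      have hsp : spC (',' :: cs) = [] :: spC cs := by simp [spC]
      rw [hsp, hps]
      simp only [List.nil_append, List.append_nil, consHead, List.map_cons, List.filter_cons]
      rw [fPV_inv cur pend hinv, ofList_ne_empty_iff]
      cases cur <;> simp
    · by_cases hw : PySem.Chars.isspace c = true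
      · have hstep : bStep (out, cur, pend) c =
            (out, cur, if cur ≠ [] then pend ++ [c] else pend) := by
          simp [bStep, hc, hw]
        rw [hstep, ih _ cur _ (ScanInv_ws cur pend c hinv hw)]
        have hsp : spC (c :: cs) = (c :: p) :: ps := by simp [spC, hc, hps]
        rw [hsp, hps]
        by_cases hcur : cur = []
        · have hpend : pend = [] := hinv.2.1 hcur
          subst hcur hpend
          simp only [ne_eq, not_true_eq_false, if_false, consHead, List.nil_append,
            List.map_cons, List.filter_cons]
          have : fPV (c :: p) = fPV p := by
            simp [fPV, PySem.Str.strip]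
            apply String.ext
            simp [strip_cons_ws c p hw, String.toList]
          rw [this]
        · simp only [ne_eq, hcur, not_false_eq_true, if_true, consHead]
          have : cur ++ (pend ++ [c]) ++ p = cur ++ pend ++ (c :: p) := by
            simp
          rw [this]
      · have hw' : PySem.Chars.isspace c = false := by
          cases h : PySem.Chars.isspace c
          · rfl
          · exact absurd h hw
        have hstep : bStep (out, cur, pend) c = (out, cur ++ pend ++ [c], []) := by
          simp [bStep, hc, hw']
        rw [hstep, ih _ _ [] (ScanInv_step cur pend c hinv hw')]
        have hsp : spC (c :: cs) = (c :: p) :: ps := by simp [spC, hc, hps]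
        rw [hsp, hps]
        simp only [consHead, List.append_nil]
        have : cur ++ pend ++ [c] ++ p = cur ++ pend ++ (c :: p) := by simp
        rw [this]

-- ===== VERDICT (by name: the statement is the Claim_ definition above) =====
theorem flatten_events_py_spec : Claim_equal_flatten_events_py := by
  intro raw _
  unfold Spec_flatten_events_py flatten_events_py flatten_events_py_alt
  simp only [inner_eq]
  have hB : (fun (out : List String) (entry : String) =>
      bFlush (entry.toList.foldl bStep (out, [], []))) =
      (fun out entry => out ++ ((spC entry.toList).map fPV).filter (fun s => s != "")) := by
    funext out entry
    rw [scan_eq entry.toList out [] [] ScanInv_nil]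
    simp [consHead_nil _ (spC_ne_nil entry.toList)]
  rw [hB]
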